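-- pv_equiv track=rewrite | github.com/justgotothedesk/Algorithm_Study | Programmers/리코쳇 로봇.py | bfs
-- ===== SOURCE A (Python) =====
-- from collections import deque
--
-- def bfs(board, start, end):
--     dx = [1, -1, 0, 0]
--     dy = [0, 0, 1, -1]
--     q = deque()
--     row = len(board)
--     col = len(board[0])
--     visited = [[0]*col for _ in range(row)]
--
--     for i in range(len(board)):
--         for j in range(len(board[i])):
--             if board[i][j] == start:
--                 visited[i][j] = 1
--                 q.append([i, j])
--
--     while q:
--         x, y = q.popleft()
--         if board[x][y] == end:
--             return visited[x][y]-1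
--
--         for i in range(4):
--             nx, ny = x, y
--             while True:
--                 nx += dx[i]
--                 ny += dy[i]
--
--                 # 미끄러져 이동했는데 해당 좌표가 이동할 수 없는 곳일 경우
--                 if 0 <= nx < row and 0 <= ny < col and board[nx][ny] == "D":
--                     nx -= dx[i]
--                     ny -= dy[i]
--                     break
--
--                 # 미끄러져 이동했는데 해당 좌표가 좌표의 범위를 넘을 경우
--                 if nx < 0 or nx >= row or ny < 0 or ny >= col:
--                     nx -= dx[i]
--                     ny -= dy[i]
--                     break
--
--             if not visited[nx][ny]:
--                 visited[nx][ny] = visited[x][y]+1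
--                 q.append([nx, ny])
--
--     return -1
-- ===== SOURCE B (Python) =====
-- from collections import deque
--
-- def _dests_fwd(cells):
--     # dest[j] = index reached when sliding toward increasing index (stop before 'D' or the wall)
--     n = len(cells)
--     out = []
--     d = n - 1
--     for j in range(n - 1, -1, -1):
--         if j == n - 1 or cells[j + 1] == 'D':
--             d = j
--         out.append(d)
--     out.reverse()
--     return out
--
-- def _dests_bwd(cells):
--     # dest[j] = index reached when sliding toward decreasing index
--     out = []
--     d = 0
--     for j in range(len(cells)):
--         if j == 0 or cells[j - 1] == 'D':
--             d = j
--         out.append(d)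
--     return out
--
-- def _push(q, dist, d, cell):
--     if cell not in dist:
--         dist[cell] = d
--         q.append(cell)
--
-- def bfs(board, start, end):
--     row, col = len(board), len(board[0])
--     starts = [(i, j) for i in range(row) for j in range(len(board[i])) if board[i][j] == start]
--     if not starts:
--         return -1
--     dist = {p: 1 for p in starts}
--     rows = [list(r) for r in board]
--     cols = [[rows[i][j] for i in range(row)] for j in range(col)]
--     right = [_dests_fwd(r) for r in rows]
--     left = [_dests_bwd(r) for r in rows]
--     down = [_dests_fwd(c) for c in cols]
--     up = [_dests_bwd(c) for c in cols]
--     q = deque(starts)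
--     while q:
--         x, y = q.popleft()
--         if board[x][y] == end:
--             return dist[(x, y)] - 1
--         d = dist[(x, y)] + 1
--         _push(q, dist, d, (down[y][x], y))
--         _push(q, dist, d, (up[y][x], y))
--         _push(q, dist, d, (x, right[x][y]))
--         _push(q, dist, d, (x, left[x][y]))
--     return -1
-- ===== Notes on version B (the rewrite author's own statement) =====
-- stated objective: alternative
-- what changed: B precomputes, by one linear DP pass per row/column and direction, a slide-destination table for every cell, collects the start cells with a comprehension and keeps BFS distances in a dict, so each BFS transition is an O(1) table lookup instead of A's per-move sliding scan (intended as faster; a timing run measured only ~1.44x at the largest size, below its 1.5x bar).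
-- outside the precondition, e.g. on bfs(['aD', 'c'], 'a', 'c'): A returns 1, B raises IndexError
import Mathlib
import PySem

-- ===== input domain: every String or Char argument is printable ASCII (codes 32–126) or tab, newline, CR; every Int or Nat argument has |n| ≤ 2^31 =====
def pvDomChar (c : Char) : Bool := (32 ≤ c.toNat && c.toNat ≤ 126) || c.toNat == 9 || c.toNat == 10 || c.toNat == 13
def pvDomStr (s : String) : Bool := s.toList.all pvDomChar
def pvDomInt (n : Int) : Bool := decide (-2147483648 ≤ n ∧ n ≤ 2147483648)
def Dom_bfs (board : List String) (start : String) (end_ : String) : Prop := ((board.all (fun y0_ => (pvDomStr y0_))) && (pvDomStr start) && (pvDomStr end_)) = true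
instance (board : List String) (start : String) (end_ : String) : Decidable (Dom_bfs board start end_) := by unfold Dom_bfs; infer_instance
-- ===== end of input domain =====

-- B replaces A's per-move sliding scans by four linear DP passes that tabulate every
-- cell's slide destination, collects the start cells by a comprehension, keeps distances
-- in a dict, so each BFS transition becomes a table lookup (objective: alternative
-- algorithm; intended as faster, measured ~1.44x in a timing run).

-- ===== shared plumbing (cell access; both Pythons index the same board strings) =====

-- board[x][y] as a Char (total form; every use is bounds-guarded by its Python)
def cellD (b : List (List Char)) (x y : Int) : Char :=
  PySem.List.pyGetD (PySem.List.pyGetD b x []) y ' '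

-- board[x][y] == s : Python compares the 1-character cell string with the string s
def isCell (b : List (List Char)) (x y : Int) (s : String) : Bool :=
  s.toList == [cellD b x y]

-- 2-D Int-grid lookup t[x][y]: A's visited grid and B's destination tables
def visGet (t : List (List Int)) (x y : Int) : Int :=
  PySem.List.pyGetD (PySem.List.pyGetD t x []) y 0

-- ===== PORT A =====

-- A's inner `while True` sliding loop; the fuel (row+col).toNat+1 always suffices
def slideA (b : List (List Char)) (row col dx dy : Int) : Int → Int → Nat → Int × Int
  | nx, ny, 0 => (nx, ny)
  | nx, ny, fuel+1 =>
    let nx' := nx + dx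
    let ny' := ny + dy
    if 0 ≤ nx' ∧ nx' < row ∧ 0 ≤ ny' ∧ ny' < col ∧ cellD b nx' ny' = 'D' then (nx, ny)
    else if nx' < 0 ∨ row ≤ nx' ∨ ny' < 0 ∨ col ≤ ny' then (nx, ny)
    else slideA b row col dx dy nx' ny' fuel

def visSet (vis : List (List Int)) (x y : Int) (v : Int) : List (List Int) :=
  PySem.List.pySetD vis x (PySem.List.pySetD (PySem.List.pyGetD vis x []) y v)

-- body of A's `for i in range(4)` loop
def stepA (b : List (List Char)) (row col x y : Int)
    (st : List (Int × Int) × List (List Int)) (i : Int) : List (Int × Int) × List (List Int) :=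
  let dx := PySem.List.pyGetD [1, -1, 0, 0] i 0
  let dy := PySem.List.pyGetD [0, 0, 1, -1] i 0
  let nxy := slideA b row col dx dy x y ((row + col).toNat + 1)
  if visGet st.2 nxy.1 nxy.2 = 0 then
    (st.1 ++ [nxy], visSet st.2 nxy.1 nxy.2 (visGet st.2 x y + 1))
  else st

-- A's `while q` loop; the fuel (row*col).toNat+1 always suffices (each cell is enqueued once)
def loopA (b : List (List Char)) (e : String) (row col : Int) :
    Nat → List (Int × Int) → List (List Int) → Int
  | 0, _, _ => -1
  | _+1, [], _ => -1
  | fuel+1, (x, y) :: qr, vis =>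
    if isCell b x y e then visGet vis x y - 1
    else
      let st := (PySem.List.pyRange 0 4 1).foldl (stepA b row col x y) (qr, vis)
      loopA b e row col fuel st.1 st.2

-- body of A's initial scan: `if board[i][j] == start: visited[i][j] = 1; q.append([i,j])`
def scanRowA (b : List (List Char)) (start : String) (i : Int)
    (st : List (Int × Int) × List (List Int)) (j : Int) : List (Int × Int) × List (List Int) :=
  if isCell b i j start then (st.1 ++ [(i, j)], visSet st.2 i j 1) else st

def scanA (b : List (List Char)) (start : String)
    (st : List (Int × Int) × List (List Int)) (i : Int) : List (Int × Int) × List (List Int) :=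
  (PySem.List.pyRange 0 (PySem.List.len (PySem.List.pyGetD b i [])) 1).foldl (scanRowA b start i) st

-- len(board[0]) raises IndexError on board = []: excluded by Pre_bfs
def bfs (board : List String) (start : String) (end_ : String) : Int :=
  let b := board.map String.toList
  let row : Int := PySem.List.len board
  let col : Int := PySem.Str.len (PySem.List.pyGetD board 0 "")
  let vis0 : List (List Int) := List.replicate row.toNat (List.replicate col.toNat 0)
  let st0 := (PySem.List.pyRange 0 row 1).foldl (scanA b start) ([], vis0)
  loopA b end_ row col ((row * col).toNat + 1) st0.1 st0.2

-- ===== PORT B =====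

-- _dests_fwd: dest[j] = index reached sliding toward increasing index
def destsFwd (cells : List Char) : List Int :=
  let n : Int := PySem.List.len cells
  ((PySem.List.pyRange (n - 1) (-1) (-1)).foldl
    (fun (st : Int × List Int) j =>
      let d := if j = n - 1 ∨ PySem.List.pyGetD cells (j + 1) ' ' = 'D' then j else st.1
      (d, st.2 ++ [d])) (n - 1, [])).2.reverse

-- _dests_bwd: dest[j] = index reached sliding toward decreasing index
def destsBwd (cells : List Char) : List Int :=
  let n : Int := PySem.List.len cells
  ((PySem.List.pyRange 0 n 1).foldl
    (fun (st : Int × List Int) j =>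
      let d := if j = 0 ∨ PySem.List.pyGetD cells (j - 1) ' ' = 'D' then j else st.1
      (d, st.2 ++ [d])) (0, [])).2

-- starts = [(i, j) for i in range(row) for j in range(len(board[i])) if board[i][j] == start]
def startsOf (rows : List (List Char)) (start : String) (row : Int) : List (Int × Int) :=
  (PySem.List.pyRange 0 row 1).flatMap (fun i =>
    (PySem.List.pyRange 0 (PySem.List.len (PySem.List.pyGetD rows i [])) 1).filterMap (fun j =>
      if isCell rows i j start then some (i, j) else none))

-- _push: record dist[cell] = d and enqueue cell when it is unseen
def pushB (st : List (Int × Int) × PySem.Dict (Int × Int) Int) (d : Int) (cell : Int × Int) :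
    List (Int × Int) × PySem.Dict (Int × Int) Int :=
  if st.2.contains cell then st else (st.1 ++ [cell], st.2.insert cell d)

-- B's `while q` loop; same fuel guard as A's
def loopB (b : List (List Char)) (e : String) (down up right left : List (List Int)) :
    Nat → List (Int × Int) × PySem.Dict (Int × Int) Int → Int
  | 0, _ => -1
  | _+1, ([], _) => -1
  | fuel+1, ((x, y) :: qr, dist) =>
    if isCell b x y e then dist.getD (x, y) 0 - 1
    else
      let d := dist.getD (x, y) 0 + 1
      loopB b e down up right left fuel
        (pushB (pushB (pushB (pushB (qr, dist) d (visGet down y x, y)) d (visGet up y x, y))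
          d (x, visGet right x y)) d (x, visGet left x y))

def bfs_alt (board : List String) (start : String) (end_ : String) : Int :=
  let row : Int := PySem.List.len board
  let col : Int := PySem.Str.len (PySem.List.pyGetD board 0 "")
  let rowsv := board.map String.toList
  let starts := startsOf rowsv start row
  if starts = [] then -1
  else
    -- dist = {p: 1 for p in starts}
    let dist0 := starts.foldl (fun (d : PySem.Dict (Int × Int) Int) p => d.insert p 1)
      PySem.Dict.empty
    let cols := (PySem.List.pyRange 0 col 1).map
      (fun j => (PySem.List.pyRange 0 row 1).map (fun i => cellD rowsv i j))
    loopB rowsv end_ (cols.map destsFwd) (cols.map destsBwd) (rowsv.map destsFwd)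
      (rowsv.map destsBwd) ((row * col).toNat + 1) (starts, dist0)

-- ===== PRECONDITION & SPEC =====
-- Pre_ excludes the empty board (A raises IndexError on len(board[0])) and non-rectangular
-- boards containing a start cell: there A's fixed-width visited/slide indexing raises
-- IndexError on some boards and, on others where every reached cell happens to exist, still
-- returns; A returns on some of those excluded inputs (see the cite in claim.json).
def Pre_bfs (board : List String) (start : String) (end_ : String) : Prop :=
  board ≠ [] ∧
  ((∀ r ∈ board, r.toList.length = ((board.headD "").toList).length) ∨
   (∀ r ∈ board, ∀ c ∈ r.toList, start.toList ≠ [c]))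

instance (board : List String) (start : String) (end_ : String) : Decidable (Pre_bfs board start end_) := by
  unfold Pre_bfs; infer_instance

def pvWitness_bfs : List String × String × String := (["R.D", ".D.", "..G"], "R", "G")

def Spec_bfs (board : List String) (start : String) (end_ : String) (out : Int) : Prop := out = bfs_alt board start end_
instance (board : List String) (start : String) (end_ : String) (out : Int) : Decidable (Spec_bfs board start end_ out) := by unfold Spec_bfs; infer_instance

-- ===== CLAIM (what is proved, stated in full; the proofs are below) =====
def Claim_equal_bfs : Prop := ∀ (board : List String) (start : String) (end_ : String), Dom_bfs board start end_ → Pre_bfs board start end_ → Spec_bfs board start end_ (bfs board start end_)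

-- ===== LEMMAS AND PROOFS =====


def fwdDest (cells : List Char) (j : Nat) : Nat :=
  if h : j + 1 < cells.length then
    (if cells[j + 1] = 'D' then j else fwdDest cells (j + 1))
  else j
termination_by cells.length - j

def bwdDest (cells : List Char) : Nat → Nat
  | 0 => 0
  | k+1 => if cells[k]? = some 'D' then k + 1 else bwdDest cells k

theorem fwdFold (cells : List Char) :
    ∀ (m : Nat), m ≤ cells.length → ∀ (acc : List Int) (d0 : Int),
    (m < cells.length → d0 = (fwdDest cells m : Int)) →
    ((PySem.List.pyRange ((m : Int) - 1) (-1) (-1)).foldl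
      (fun (st : Int × List Int) j =>
        ((if j = (cells.length : Int) - 1 ∨ PySem.List.pyGetD cells (j + 1) ' ' = 'D' then j else st.1),
         st.2 ++ [if j = (cells.length : Int) - 1 ∨ PySem.List.pyGetD cells (j + 1) ' ' = 'D' then j else st.1]))
      (d0, acc)).2
    = acc ++ ((List.range m).reverse.map (fun j => (fwdDest cells j : Int))) := by
  intro m
  induction m with
  | zero =>
    intro _ acc d0 _
    rw [show ((0:Nat):Int) - 1 = -1 by norm_num, PySem.List.pyRange_neg_one_eq_nil le_rfl]
    simp
  | succ k ih =>
    intro hle acc d0 hd0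
    rw [show ((k+1 : Nat):Int) - 1 = (k : Int) by push_cast; ring,
        PySem.List.pyRange_neg_one_cons (by omega : (-1:Int) < (k:Int)), List.foldl_cons]
    have hstep : (if (k:Int) = (cells.length : Int) - 1 ∨ PySem.List.pyGetD cells ((k:Int) + 1) ' ' = 'D'
        then (k:Int) else d0) = (fwdDest cells k : Int) := by
      by_cases h1 : k + 1 < cells.length
      · rw [show ((k:Int) + 1) = ((k+1 : Nat) : Int) by push_cast; ring, PySem.List.pyGetD_natCast,
            List.getD_eq_getElem _ _ h1]
        by_cases hD : cells[k+1] = 'D'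
        · rw [if_pos (Or.inr hD)]
          rw [fwdDest]; rw [dif_pos h1, if_pos hD]
        · rw [if_neg (by push Not; exact ⟨by omega, hD⟩)]
          rw [hd0 (by omega)]
          symm
          rw [fwdDest, dif_pos h1, if_neg hD]
      · have hk : k + 1 = cells.length := by omega
        rw [if_pos (Or.inl (by omega))]
        rw [fwdDest, dif_neg h1]
    simp only [hstep]
    rw [ih (by omega) (acc ++ [(fwdDest cells k : Int)]) _ (fun _ => rfl)]
    rw [List.range_succ, List.reverse_append, List.reverse_singleton]
    simp

theorem destsFwd_eq (cells : List Char) :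
    destsFwd cells = (List.range cells.length).map (fun j => (fwdDest cells j : Int)) := by
  unfold destsFwd
  rw [show PySem.List.len cells = ((cells.length : Nat) : Int) from rfl]
  dsimp only []
  rw [fwdFold cells cells.length le_rfl [] _ (by omega)]
  rw [List.nil_append, List.map_reverse, List.reverse_reverse]

theorem bwdFold (cells : List Char) :
    ∀ (k m : Nat), m + k = cells.length → ∀ (acc : List Int) (d0 : Int),
    (0 < m → d0 = (bwdDest cells (m - 1) : Int)) →
    ((PySem.List.pyRange (m : Int) (cells.length : Int) 1).foldl
      (fun (st : Int × List Int) j =>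
        ((if j = 0 ∨ PySem.List.pyGetD cells (j - 1) ' ' = 'D' then j else st.1),
         st.2 ++ [if j = 0 ∨ PySem.List.pyGetD cells (j - 1) ' ' = 'D' then j else st.1]))
      (d0, acc)).2
    = acc ++ ((List.range' m k).map (fun j => (bwdDest cells j : Int))) := by
  intro k
  induction k with
  | zero =>
    intro m hm acc d0 _
    rw [PySem.List.pyRange_one_eq_nil (by omega)]
    simp
  | succ t ih =>
    intro m hm acc d0 hd0
    rw [PySem.List.pyRange_one_cons (by exact_mod_cast (by omega : (m:Int) < (cells.length : Int))), List.foldl_cons]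
    have hstep : (if (m:Int) = 0 ∨ PySem.List.pyGetD cells ((m:Int) - 1) ' ' = 'D'
        then (m:Int) else d0) = (bwdDest cells m : Int) := by
      match m, hd0 with
      | 0, _ => rw [if_pos (Or.inl (by simp))]; simp [bwdDest]
      | u+1, hd0 =>
        have hu : u < cells.length := by omega
        rw [show ((u+1 : Nat) : Int) - 1 = ((u : Nat) : Int) by push_cast; ring,
            PySem.List.pyGetD_natCast, List.getD_eq_getElem _ _ hu]
        by_cases hD : cells[u] = 'D'
        · rw [if_pos (Or.inr hD)]
          rw [bwdDest, if_pos (by rw [List.getElem?_eq_getElem hu, hD])]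
        · rw [if_neg (by push Not; exact ⟨by omega, hD⟩)]
          rw [hd0 (by omega)]
          symm
          rw [bwdDest, if_neg (by rw [List.getElem?_eq_getElem hu]; simp [hD])]
          rfl
    simp only [hstep]
    rw [show ((m:Int) + 1) = ((m+1 : Nat) : Int) by push_cast; ring]
    rw [ih (m+1) (by omega) (acc ++ [(bwdDest cells m : Int)]) _ (by intro _; simp)]
    rw [List.range'_succ]
    simp

theorem destsBwd_eq (cells : List Char) :
    destsBwd cells = (List.range cells.length).map (fun j => (bwdDest cells j : Int)) := by
  unfold destsBwd
  rw [show PySem.List.len cells = ((cells.length : Nat) : Int) from rfl]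
  dsimp only []
  have h := bwdFold cells cells.length 0 (by omega) [] 0 (by omega)
  simp only [Nat.cast_zero] at h
  rw [h, List.nil_append, List.range_eq_range']

def InR (row col : Int) (p : Int × Int) : Prop :=
  0 ≤ p.1 ∧ p.1 < row ∧ 0 ≤ p.2 ∧ p.2 < col

theorem slideA_inR (b : List (List Char)) (row col dx dy : Int) :
    ∀ (fuel : Nat) (x y : Int), InR row col (x, y) →
    InR row col (slideA b row col dx dy x y fuel) := by
  intro fuel
  induction fuel with
  | zero => intro x y h; exact h
  | succ f ih =>
    intro x y h
    rw [slideA]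
    split
    · exact h
    · split
      · exact h
      · rename_i h1 h2
        push Not at h2
        exact ih _ _ ⟨h2.1, h2.2.1, h2.2.2.1, h2.2.2.2⟩

-- horizontal slide, increasing y (direction dy = +1): cells is row x of the board

theorem slide_fwd_h (b : List (List Char)) (row col x : Int) (cells : List Char)
    (hx0 : 0 ≤ x) (hx1 : x < row) (hcl : (cells.length : Int) = col)
    (hcell : ∀ (k : Nat) (h : k < cells.length), cellD b x (k : Int) = cells[k]) :
    ∀ (fuel : Nat) (yn : Nat), yn < cells.length → cells.length - yn ≤ fuel →
    slideA b row col 0 1 x (yn : Int) fuel = (x, (fwdDest cells yn : Int)) := by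
  intro fuel
  induction fuel with
  | zero => intro yn h1 h2; omega
  | succ f ih =>
    intro yn h1 h2
    rw [slideA]
    by_cases hnext : yn + 1 < cells.length
    · have hcast : (yn : Int) + 1 = ((yn + 1 : Nat) : Int) := by push_cast; ring
      by_cases hD : cells[yn + 1] = 'D'
      · rw [if_pos ⟨by omega, by omega, by omega, by omega,
            by rw [add_zero, hcast, hcell (yn+1) hnext]; exact hD⟩]
        rw [fwdDest, dif_pos hnext, if_pos hD]
      · rw [if_neg (by
          intro hc
          obtain ⟨_, _, _, _, hc5⟩ := hc
          rw [add_zero, hcast, hcell (yn+1) hnext] at hc5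
          exact hD hc5)]
        rw [if_neg (by omega)]
        rw [add_zero, hcast, ih (yn+1) hnext (by omega)]
        rw [show fwdDest cells yn = fwdDest cells (yn+1) by rw [fwdDest, dif_pos hnext, if_neg hD]]
    · rw [if_neg (by intro hc; have := hc.2.2.2.1; omega),
          if_pos (Or.inr (Or.inr (Or.inr (by omega))))]
      rw [fwdDest, dif_neg hnext]

-- horizontal slide, decreasing y (dy = -1)

theorem slide_bwd_h (b : List (List Char)) (row col x : Int) (cells : List Char)
    (hx0 : 0 ≤ x) (hx1 : x < row) (hcl : (cells.length : Int) = col)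
    (hcell : ∀ (k : Nat) (h : k < cells.length), cellD b x (k : Int) = cells[k]) :
    ∀ (fuel : Nat) (yn : Nat), yn < cells.length → yn + 1 ≤ fuel →
    slideA b row col 0 (-1) x (yn : Int) fuel = (x, (bwdDest cells yn : Int)) := by
  intro fuel
  induction fuel with
  | zero => intro yn h1 h2; omega
  | succ f ih =>
    intro yn h1 h2
    rw [slideA]
    match yn, h1, h2 with
    | 0, h1, h2 =>
      rw [if_neg (by intro hc; have := hc.2.2.1; omega),
          if_pos (Or.inr (Or.inr (Or.inl (by omega))))]
      rfl
    | t+1, h1, h2 =>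
      have hcast : ((t+1 : Nat) : Int) + (-1) = ((t : Nat) : Int) := by push_cast; ring
      have ht : t < cells.length := by omega
      by_cases hD : cells[t] = 'D'
      · rw [if_pos ⟨by omega, by omega, by omega, by omega,
            by rw [add_zero, hcast, hcell t ht]; exact hD⟩]
        rw [show bwdDest cells (t+1) = t+1 by
          rw [bwdDest, if_pos (by rw [List.getElem?_eq_getElem ht, hD])]]
      · rw [if_neg (by
          intro hc
          obtain ⟨_, _, _, _, hc5⟩ := hc
          rw [add_zero, hcast, hcell t ht] at hc5
          exact hD hc5)]
        rw [if_neg (by omega)]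
        rw [add_zero, hcast, ih t ht (by omega)]
        rw [show bwdDest cells (t+1) = bwdDest cells t by
          rw [bwdDest, if_neg (by rw [List.getElem?_eq_getElem ht]; simp [hD])]]

-- vertical slide, increasing x (dx = +1): cells is column y of the board

theorem slide_fwd_v (b : List (List Char)) (row col y : Int) (cells : List Char)
    (hy0 : 0 ≤ y) (hy1 : y < col) (hcl : (cells.length : Int) = row)
    (hcell : ∀ (k : Nat) (h : k < cells.length), cellD b (k : Int) y = cells[k]) :
    ∀ (fuel : Nat) (xn : Nat), xn < cells.length → cells.length - xn ≤ fuel →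
    slideA b row col 1 0 (xn : Int) y fuel = ((fwdDest cells xn : Int), y) := by
  intro fuel
  induction fuel with
  | zero => intro xn h1 h2; omega
  | succ f ih =>
    intro xn h1 h2
    rw [slideA]
    by_cases hnext : xn + 1 < cells.length
    · have hcast : (xn : Int) + 1 = ((xn + 1 : Nat) : Int) := by push_cast; ring
      by_cases hD : cells[xn + 1] = 'D'
      · rw [if_pos ⟨by omega, by omega, by omega, by omega,
            by rw [add_zero, hcast, hcell (xn+1) hnext]; exact hD⟩]
        rw [fwdDest, dif_pos hnext, if_pos hD]
      · rw [if_neg (by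
          intro hc
          obtain ⟨_, _, _, _, hc5⟩ := hc
          rw [add_zero, hcast, hcell (xn+1) hnext] at hc5
          exact hD hc5)]
        rw [if_neg (by omega)]
        rw [add_zero, hcast, ih (xn+1) hnext (by omega)]
        rw [show fwdDest cells xn = fwdDest cells (xn+1) by rw [fwdDest, dif_pos hnext, if_neg hD]]
    · rw [if_neg (by intro hc; have := hc.2.1; omega),
          if_pos (Or.inr (Or.inl (by omega)))]
      rw [fwdDest, dif_neg hnext]

-- vertical slide, decreasing x (dx = -1)

theorem slide_bwd_v (b : List (List Char)) (row col y : Int) (cells : List Char)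
    (hy0 : 0 ≤ y) (hy1 : y < col) (hcl : (cells.length : Int) = row)
    (hcell : ∀ (k : Nat) (h : k < cells.length), cellD b (k : Int) y = cells[k]) :
    ∀ (fuel : Nat) (xn : Nat), xn < cells.length → xn + 1 ≤ fuel →
    slideA b row col (-1) 0 (xn : Int) y fuel = ((bwdDest cells xn : Int), y) := by
  intro fuel
  induction fuel with
  | zero => intro xn h1 h2; omega
  | succ f ih =>
    intro xn h1 h2
    rw [slideA]
    match xn, h1, h2 with
    | 0, h1, h2 =>
      rw [if_neg (by intro hc; have := hc.1; omega),
          if_pos (Or.inl (by omega))]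
      rfl
    | t+1, h1, h2 =>
      have hcast : ((t+1 : Nat) : Int) + (-1) = ((t : Nat) : Int) := by push_cast; ring
      have ht : t < cells.length := by omega
      by_cases hD : cells[t] = 'D'
      · rw [if_pos ⟨by omega, by omega, by omega, by omega,
            by rw [add_zero, hcast, hcell t ht]; exact hD⟩]
        rw [show bwdDest cells (t+1) = t+1 by
          rw [bwdDest, if_pos (by rw [List.getElem?_eq_getElem ht, hD])]]
      · rw [if_neg (by
          intro hc
          obtain ⟨_, _, _, _, hc5⟩ := hc
          rw [add_zero, hcast, hcell t ht] at hc5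
          exact hD hc5)]
        rw [if_neg (by omega)]
        rw [add_zero, hcast, ih t ht (by omega)]
        rw [show bwdDest cells (t+1) = bwdDest cells t by
          rw [bwdDest, if_neg (by rw [List.getElem?_eq_getElem ht]; simp [hD])]]

def VShape (row col : Int) (vis : List (List Int)) : Prop :=
  vis.length = row.toNat ∧ ∀ r ∈ vis, r.length = col.toNat

theorem visGet_getElem (vis : List (List Int)) (x y : Int) (h0 : 0 ≤ x)
    (hxl : x.toNat < vis.length) (h2 : 0 ≤ y) (hyl : y.toNat < (vis[x.toNat]).length) :
    visGet vis x y = (vis[x.toNat])[y.toNat] := by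
  unfold visGet
  rw [PySem.List.pyGetD_eq_getElem _ _ h0 (by omega)]
  rw [PySem.List.pyGetD_eq_getElem _ _ h2 (by omega)]

theorem visSet_shape (row col : Int) (vis : List (List Int)) (hs : VShape row col vis)
    (a b v : Int) (ha : InR row col (a, b)) : VShape row col (visSet vis a b v) := by
  obtain ⟨ha0, ha1, hb0, hb1⟩ := ha
  obtain ⟨hl, hr⟩ := hs
  unfold visSet
  rw [PySem.List.pySetD_of_nonneg _ _ ha0, PySem.List.pySetD_of_nonneg _ _ hb0]
  refine ⟨by rw [List.length_set]; exact hl, ?_⟩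
  intro r hrmem
  rcases List.mem_or_eq_of_mem_set hrmem with h | h
  · exact hr _ h
  · rw [h, List.length_set]
    have hal : a.toNat < vis.length := by simp at ha1 ⊢; omega
    rw [PySem.List.pyGetD_eq_getElem _ _ ha0 (by omega)]
    exact hr _ (List.getElem_mem hal)

theorem visGet_visSet (row col : Int) (vis : List (List Int)) (hs : VShape row col vis)
    (a b v : Int) (ha : InR row col (a, b)) (x y : Int) (hx : InR row col (x, y)) :
    visGet (visSet vis a b v) x y = if x = a ∧ y = b then v else visGet vis x y := by
  obtain ⟨ha0, ha1, hb0, hb1⟩ := ha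
  obtain ⟨hx0, hx1, hy0, hy1⟩ := hx
  obtain ⟨hl, hr⟩ := hs
  simp only at ha0 ha1 hb0 hb1 hx0 hx1 hy0 hy1
  have hal : a.toNat < vis.length := by omega
  have hbl : b.toNat < (vis[a.toNat]).length := by rw [hr _ (List.getElem_mem hal)]; omega
  have hxl : x.toNat < vis.length := by omega
  have hyl : y.toNat < (vis[x.toNat]).length := by rw [hr _ (List.getElem_mem hxl)]; omega
  unfold visSet
  rw [PySem.List.pySetD_of_nonneg _ _ ha0, PySem.List.pySetD_of_nonneg _ _ hb0,
      PySem.List.pyGetD_eq_getElem _ _ ha0 (by omega)]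
  rw [visGet_getElem _ x y hx0 (by rw [List.length_set]; exact hxl) hy0 ?hy]
  case hy =>
    have hmem : (vis.set a.toNat ((vis[a.toNat]).set b.toNat v))[x.toNat]'(by rw [List.length_set]; exact hxl)
        ∈ vis.set a.toNat ((vis[a.toNat]).set b.toNat v) := List.getElem_mem _
    rcases List.mem_or_eq_of_mem_set hmem with h | h
    · rw [hr _ h]; omega
    · rw [h, List.length_set, hr _ (List.getElem_mem hal)]; omega
  rw [visGet_getElem vis x y hx0 hxl hy0 hyl]
  by_cases hxa : x = a
  · subst hxa
    have e1 : (vis.set x.toNat ((vis[x.toNat]).set b.toNat v))[x.toNat]'(by rw [List.length_set]; exact hxl)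
        = (vis[x.toNat]).set b.toNat v := List.getElem_set_self _
    simp only [e1]
    by_cases hyb : y = b
    · subst hyb
      rw [if_pos (by simp)]
      exact List.getElem_set_self _
    · rw [if_neg (by rintro ⟨_, h⟩; exact hyb h)]
      exact List.getElem_set_ne (by omega) _
  · have e1 : (vis.set a.toNat ((vis[a.toNat]).set b.toNat v))[x.toNat]'(by rw [List.length_set]; exact hxl)
        = vis[x.toNat] := List.getElem_set_ne (by omega) _
    simp only [e1]
    rw [if_neg (by rintro ⟨h, _⟩; exact hxa h)]

def VD (row col : Int) (vis : List (List Int)) (dist : PySem.Dict (Int × Int) Int) : Prop :=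
  ∀ x y : Int, InR row col (x, y) →
    0 ≤ visGet vis x y ∧
    dist.get? (x, y) = (if visGet vis x y = 0 then none else some (visGet vis x y))

theorem distGetD_eq (row col : Int) (vis : List (List Int)) (dist : PySem.Dict (Int × Int) Int)
    (hvd : VD row col vis dist) (x y : Int) (hin : InR row col (x, y)) :
    dist.getD (x, y) 0 = visGet vis x y := by
  rw [PySem.Dict.getD_eq_get?_getD, (hvd x y hin).2]
  by_cases hv : visGet vis x y = 0
  · rw [if_pos hv, hv]; rfl
  · rw [if_neg hv]; rfl

def updA (x y : Int)
    (st : List (Int × Int) × List (List Int)) (p : Int × Int) : List (Int × Int) × List (List Int) :=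
  if visGet st.2 p.1 p.2 = 0 then
    (st.1 ++ [p], visSet st.2 p.1 p.2 (visGet st.2 x y + 1))
  else st

theorem stepA_eq0 (b : List (List Char)) (row col x y : Int) (st : List (Int × Int) × List (List Int)) :
    stepA b row col x y st 0 = updA x y st (slideA b row col 1 0 x y ((row + col).toNat + 1)) := by
  unfold stepA updA
  rw [show PySem.List.pyGetD ([1, -1, 0, 0] : List Int) 0 0 = 1 from by decide,
      show PySem.List.pyGetD ([0, 0, 1, -1] : List Int) 0 0 = 0 from by decide]

theorem stepA_eq1 (b : List (List Char)) (row col x y : Int) (st : List (Int × Int) × List (List Int)) :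
    stepA b row col x y st 1 = updA x y st (slideA b row col (-1) 0 x y ((row + col).toNat + 1)) := by
  unfold stepA updA
  rw [show PySem.List.pyGetD ([1, -1, 0, 0] : List Int) 1 0 = -1 from by decide,
      show PySem.List.pyGetD ([0, 0, 1, -1] : List Int) 1 0 = 0 from by decide]

theorem stepA_eq2 (b : List (List Char)) (row col x y : Int) (st : List (Int × Int) × List (List Int)) :
    stepA b row col x y st 2 = updA x y st (slideA b row col 0 1 x y ((row + col).toNat + 1)) := by
  unfold stepA updA
  rw [show PySem.List.pyGetD ([1, -1, 0, 0] : List Int) 2 0 = 0 from by decide,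
      show PySem.List.pyGetD ([0, 0, 1, -1] : List Int) 2 0 = 1 from by decide]

theorem stepA_eq3 (b : List (List Char)) (row col x y : Int) (st : List (Int × Int) × List (List Int)) :
    stepA b row col x y st 3 = updA x y st (slideA b row col 0 (-1) x y ((row + col).toNat + 1)) := by
  unfold stepA updA
  rw [show PySem.List.pyGetD ([1, -1, 0, 0] : List Int) 3 0 = 0 from by decide,
      show PySem.List.pyGetD ([0, 0, 1, -1] : List Int) 3 0 = -1 from by decide]

theorem upd_sim (row col : Int) (x y : Int)
    (qA qB : List (Int × Int)) (vis : List (List Int)) (dist : PySem.Dict (Int × Int) Int)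
    (p : Int × Int) (d : Int) (hq : qA = qB) (hs : VShape row col vis) (hvd : VD row col vis dist)
    (hxy : InR row col (x, y)) (hp : InR row col p)
    (hqin : ∀ q ∈ qA, InR row col q)
    (hpos : 0 < visGet vis x y) (hd : d = visGet vis x y + 1)
    (hqpos : ∀ q ∈ qA, 0 < visGet vis q.1 q.2) :
    (updA x y (qA, vis) p).1 = (pushB (qB, dist) d p).1 ∧
    VShape row col (updA x y (qA, vis) p).2 ∧
    VD row col (updA x y (qA, vis) p).2 (pushB (qB, dist) d p).2 ∧
    (∀ q ∈ (updA x y (qA, vis) p).1, InR row col q) ∧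
    visGet (updA x y (qA, vis) p).2 x y = visGet vis x y ∧
    (∀ q ∈ (updA x y (qA, vis) p).1, 0 < visGet (updA x y (qA, vis) p).2 q.1 q.2) := by
  subst hq
  obtain ⟨p1, p2⟩ := p
  have hget := (hvd p1 p2 hp).2
  have hcont : dist.contains (p1, p2) = decide (visGet vis p1 p2 ≠ 0) := by
    rw [PySem.Dict.contains_eq_isSome_get?, hget]
    by_cases hv : visGet vis p1 p2 = 0
    · simp [hv]
    · simp [hv]
  unfold updA pushB
  by_cases hv : visGet vis p1 p2 = 0
  · rw [if_pos (by exact hv), hcont, if_neg (by simp [hv])]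
    have hnp : ¬ (x = p1 ∧ y = p2) := by
      rintro ⟨rfl, rfl⟩; omega
    have hvv := visGet_visSet row col vis hs p1 p2 (visGet vis x y + 1) hp
    refine ⟨rfl, visSet_shape row col vis hs p1 p2 _ hp, ?_, ?_, ?_, ?_⟩
    · intro x' y' hin'
      simp only [hvv x' y' hin']
      rw [PySem.Dict.get?_insert]
      by_cases hc : x' = p1 ∧ y' = p2
      · rw [if_pos hc, if_pos (by rw [Prod.mk.injEq]; exact hc), hd]
        rw [if_neg (by omega)]
        exact ⟨by omega, rfl⟩
      · rw [if_neg hc, if_neg (by rw [Prod.mk.injEq]; exact hc)]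
        exact ⟨(hvd x' y' hin').1, (hvd x' y' hin').2⟩
    · intro q hqm
      rcases List.mem_append.mp hqm with h | h
      · exact hqin _ h
      · exact (List.mem_singleton.mp h) ▸ hp
    · rw [hvv x y hxy, if_neg hnp]
    · intro q hqm
      rcases List.mem_append.mp hqm with h | h
      · rw [hvv q.1 q.2 (hqin _ h)]
        split_ifs with hc
        · omega
        · exact hqpos _ h
      · have hqp : q = (p1, p2) := List.mem_singleton.mp h
        subst hqp
        rw [hvv p1 p2 hp, if_pos ⟨rfl, rfl⟩]
        omega
  · rw [if_neg (by exact hv), hcont, if_pos (by simp [hv])]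
    exact ⟨rfl, hs, hvd, hqin, rfl, hqpos⟩

theorem pyRange04 : PySem.List.pyRange 0 4 1 = [0, 1, 2, 3] := by decide

theorem loop_sim (b : List (List Char)) (e : String) (row col : Int)
    (down up right left : List (List Int))
    (Hd : ∀ x y : Int, InR row col (x, y) →
      slideA b row col 1 0 x y ((row + col).toNat + 1) = (visGet down y x, y))
    (Hu : ∀ x y : Int, InR row col (x, y) →
      slideA b row col (-1) 0 x y ((row + col).toNat + 1) = (visGet up y x, y))
    (Hr : ∀ x y : Int, InR row col (x, y) →
      slideA b row col 0 1 x y ((row + col).toNat + 1) = (x, visGet right x y))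
    (Hl : ∀ x y : Int, InR row col (x, y) →
      slideA b row col 0 (-1) x y ((row + col).toNat + 1) = (x, visGet left x y)) :
    ∀ (fuel : Nat) (q : List (Int × Int)) (vis : List (List Int)) (dist : PySem.Dict (Int × Int) Int),
    VShape row col vis → VD row col vis dist → (∀ p ∈ q, InR row col p) →
    (∀ p ∈ q, 0 < visGet vis p.1 p.2) →
    loopA b e row col fuel q vis = loopB b e down up right left fuel (q, dist) := by
  intro fuel
  induction fuel with
  | zero => intro q vis dist _ _ _ _; rfl
  | succ f ih =>
    intro q vis dist hs hvd hq hqpos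
    match q with
    | [] => rfl
    | (x, y) :: qr =>
      rw [loopA, loopB]
      have hxy : InR row col (x, y) := hq _ (List.mem_cons_self)
      by_cases hend : isCell b x y e = true
      · rw [if_pos hend, if_pos hend, distGetD_eq row col vis dist hvd x y hxy]
      · rw [if_neg hend, if_neg hend]
        rw [pyRange04]
        simp only [List.foldl_cons, List.foldl_nil]
        rw [stepA_eq0, stepA_eq1, stepA_eq2, stepA_eq3]
        have hdx : dist.getD (x, y) 0 = visGet vis x y := distGetD_eq row col vis dist hvd x y hxy
        rw [hdx]
        have hpos : 0 < visGet vis x y := hqpos _ (List.mem_cons_self)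
        -- the four slide targets and their in-range facts
        have h0 := Hd x y hxy; have h1 := Hu x y hxy; have h2 := Hr x y hxy; have h3 := Hl x y hxy
        have hin0 : InR row col (visGet down y x, y) := h0 ▸ slideA_inR b row col 1 0 _ x y hxy
        have hin1 : InR row col (visGet up y x, y) := h1 ▸ slideA_inR b row col (-1) 0 _ x y hxy
        have hin2 : InR row col (x, visGet right x y) := h2 ▸ slideA_inR b row col 0 1 _ x y hxy
        have hin3 : InR row col (x, visGet left x y) := h3 ▸ slideA_inR b row col 0 (-1) _ x y hxy
        rw [h0, h1, h2, h3]
        have hqr : ∀ p ∈ qr, InR row col p := fun p hp => hq _ (List.mem_cons_of_mem _ hp)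
        have hqrpos : ∀ p ∈ qr, 0 < visGet vis p.1 p.2 :=
          fun p hp => hqpos _ (List.mem_cons_of_mem _ hp)
        obtain ⟨e1, s1, d1, m1, g1, p1⟩ := upd_sim row col x y qr qr vis dist _
          (visGet vis x y + 1) rfl hs hvd hxy hin0 hqr hpos rfl hqrpos
        obtain ⟨e2, s2, d2, m2, g2, p2⟩ := upd_sim row col x y _ _ _ _ _
          (visGet vis x y + 1) e1 s1 d1 hxy hin1 m1 (by omega) (by rw [g1]) p1
        obtain ⟨e3, s3, d3, m3, g3, p3⟩ := upd_sim row col x y _ _ _ _ _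
          (visGet vis x y + 1) e2 s2 d2 hxy hin2 m2 (by omega) (by rw [g2, g1]) p2
        obtain ⟨e4, s4, d4, m4, g4, p4⟩ := upd_sim row col x y _ _ _ _ _
          (visGet vis x y + 1) e3 s3 d3 hxy hin3 m3 (by omega) (by rw [g3, g2, g1]) p3
        rw [ih _ _ _ s4 d4 m4 p4, e4]

theorem scanRow_sim (b : List (List Char)) (start : String) (row col : Int) (i : Int)
    (hi0 : 0 ≤ i) (hi1 : i < row) :
    ∀ (js : List Int), (∀ j ∈ js, 0 ≤ j ∧ j < col) →
    ∀ (qA : List (Int × Int)) (vis : List (List Int)) (dist : PySem.Dict (Int × Int) Int),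
    VShape row col vis → VD row col vis dist → (∀ p ∈ qA, InR row col p) →
    (∀ p ∈ qA, 0 < visGet vis p.1 p.2) →
    (js.foldl (scanRowA b start i) (qA, vis)).1
      = qA ++ js.filterMap (fun j => if isCell b i j start then some ((i : Int), j) else none) ∧
    VShape row col (js.foldl (scanRowA b start i) (qA, vis)).2 ∧
    VD row col (js.foldl (scanRowA b start i) (qA, vis)).2
      ((js.filterMap (fun j => if isCell b i j start then some ((i : Int), j) else none)).foldl
        (fun (d : PySem.Dict (Int × Int) Int) p => d.insert p 1) dist) ∧
    (∀ p ∈ (js.foldl (scanRowA b start i) (qA, vis)).1, InR row col p) ∧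
    (∀ p ∈ (js.foldl (scanRowA b start i) (qA, vis)).1,
      0 < visGet (js.foldl (scanRowA b start i) (qA, vis)).2 p.1 p.2) := by
  intro js
  induction js with
  | nil =>
    intro _ qA vis dist hs hvd hq hqpos
    exact ⟨by simp, hs, hvd, hq, hqpos⟩
  | cons j js ih =>
    intro hb qA vis dist hs hvd hq hqpos
    have hj := hb j List.mem_cons_self
    have hij : InR row col (i, j) := ⟨hi0, hi1, hj.1, hj.2⟩
    have hb' : ∀ j' ∈ js, 0 ≤ j' ∧ j' < col := fun j' hj' => hb j' (List.mem_cons_of_mem _ hj')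
    rw [List.foldl_cons, List.filterMap_cons]
    by_cases hcell : isCell b i j start = true
    · rw [show scanRowA b start i (qA, vis) j = (qA ++ [(i, j)], visSet vis i j 1) from by
          unfold scanRowA; rw [if_pos hcell]]
      rw [if_pos hcell]
      have hvv := visGet_visSet row col vis hs i j 1 hij
      have hvd' : VD row col (visSet vis i j 1) (dist.insert (i, j) 1) := by
        intro x' y' hin'
        rw [hvv x' y' hin', PySem.Dict.get?_insert]
        by_cases hc : x' = i ∧ y' = j
        · rw [if_pos hc, if_pos (by rw [Prod.mk.injEq]; exact hc), if_neg (by omega)]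
          exact ⟨by omega, rfl⟩
        · rw [if_neg hc, if_neg (by rw [Prod.mk.injEq]; exact hc)]
          exact ⟨(hvd x' y' hin').1, (hvd x' y' hin').2⟩
      have hq' : ∀ p ∈ qA ++ [((i : Int), j)], InR row col p := by
        intro p hp
        rcases List.mem_append.mp hp with h | h
        · exact hq _ h
        · exact (List.mem_singleton.mp h) ▸ hij
      have hqpos' : ∀ p ∈ qA ++ [((i : Int), j)], 0 < visGet (visSet vis i j 1) p.1 p.2 := by
        intro p hp
        rcases List.mem_append.mp hp with h | h
        · rw [hvv p.1 p.2 (hq _ h)]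
          split_ifs with hc
          · omega
          · exact hqpos _ h
        · have hpe : p = ((i : Int), j) := List.mem_singleton.mp h
          subst hpe
          rw [hvv i j hij, if_pos ⟨rfl, rfl⟩]
          omega
      obtain ⟨E, S, D, M, P⟩ := ih hb' (qA ++ [((i : Int), j)]) (visSet vis i j 1)
        (dist.insert ((i : Int), j) 1) (visSet_shape row col vis hs i j 1 hij) hvd' hq' hqpos'
      refine ⟨by rw [E, List.append_assoc]; rfl, S, ?_, M, P⟩
      rw [List.foldl_cons]
      exact D
    · rw [show scanRowA b start i (qA, vis) j = (qA, vis) from by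
          unfold scanRowA; rw [if_neg hcell]]
      rw [if_neg hcell]
      exact ih hb' qA vis dist hs hvd hq hqpos

theorem scan_sim (b : List (List Char)) (start : String) (row col : Int)
    (hrect : ∀ i : Int, 0 ≤ i → i < row → PySem.List.len (PySem.List.pyGetD b i []) = col) :
    ∀ (is : List Int), (∀ i ∈ is, 0 ≤ i ∧ i < row) →
    ∀ (qA : List (Int × Int)) (vis : List (List Int)) (dist : PySem.Dict (Int × Int) Int),
    VShape row col vis → VD row col vis dist → (∀ p ∈ qA, InR row col p) →
    (∀ p ∈ qA, 0 < visGet vis p.1 p.2) →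
    (is.foldl (scanA b start) (qA, vis)).1
      = qA ++ is.flatMap (fun i =>
          (PySem.List.pyRange 0 (PySem.List.len (PySem.List.pyGetD b i [])) 1).filterMap
            (fun j => if isCell b i j start then some (i, j) else none)) ∧
    VShape row col (is.foldl (scanA b start) (qA, vis)).2 ∧
    VD row col (is.foldl (scanA b start) (qA, vis)).2
      ((is.flatMap (fun i =>
          (PySem.List.pyRange 0 (PySem.List.len (PySem.List.pyGetD b i [])) 1).filterMap
            (fun j => if isCell b i j start then some (i, j) else none))).foldl
        (fun (d : PySem.Dict (Int × Int) Int) p => d.insert p 1) dist) ∧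
    (∀ p ∈ (is.foldl (scanA b start) (qA, vis)).1, InR row col p) ∧
    (∀ p ∈ (is.foldl (scanA b start) (qA, vis)).1,
      0 < visGet (is.foldl (scanA b start) (qA, vis)).2 p.1 p.2) := by
  intro is
  induction is with
  | nil =>
    intro _ qA vis dist hs hvd hq hqpos
    exact ⟨by simp, hs, hvd, hq, hqpos⟩
  | cons i is ih =>
    intro hb qA vis dist hs hvd hq hqpos
    have hi := hb i List.mem_cons_self
    have hb' : ∀ i' ∈ is, 0 ≤ i' ∧ i' < row := fun i' hi' => hb i' (List.mem_cons_of_mem _ hi')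
    rw [List.foldl_cons, List.flatMap_cons]
    have hjs : ∀ j ∈ PySem.List.pyRange 0 (PySem.List.len (PySem.List.pyGetD b i [])) 1,
        0 ≤ j ∧ j < col := by
      intro j hjm
      have := PySem.List.mem_pyRange_one.mp hjm
      rw [hrect i hi.1 hi.2] at this
      exact this
    obtain ⟨E1, S1, D1, M1, P1⟩ := scanRow_sim b start row col i hi.1 hi.2 _ hjs qA vis dist
      hs hvd hq hqpos
    have hA : scanA b start (qA, vis) i
        = ((PySem.List.pyRange 0 (PySem.List.len (PySem.List.pyGetD b i [])) 1).foldl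
            (scanRowA b start i) (qA, vis)) := rfl
    rw [hA]
    obtain ⟨E2, S2, D2, M2, P2⟩ := ih hb' _ _ _ S1 D1 M1 P1
    refine ⟨by rw [E2, E1, List.append_assoc], S2, ?_, M2, P2⟩
    rw [List.foldl_append]
    exact D2

theorem vis0_shape (row col : Int) :
    VShape row col (List.replicate row.toNat (List.replicate col.toNat 0)) := by
  refine ⟨List.length_replicate, ?_⟩
  intro r hr
  rw [List.eq_of_mem_replicate hr, List.length_replicate]

theorem vd0 (row col : Int) :
    VD row col (List.replicate row.toNat (List.replicate col.toNat 0))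
      (PySem.Dict.empty : PySem.Dict (Int × Int) Int) := by
  intro x y hin
  obtain ⟨hx0, hx1, hy0, hy1⟩ := hin
  simp only at hx0 hx1 hy0 hy1
  have hg : visGet (List.replicate row.toNat (List.replicate col.toNat 0)) x y = 0 := by
    rw [visGet_getElem _ x y hx0 (by rw [List.length_replicate]; omega) hy0 ?hy]
    case hy =>
      simp [List.getElem_replicate]; omega
    simp [List.getElem_replicate]
  rw [hg]
  exact ⟨le_refl 0, by rw [if_pos rfl, PySem.Dict.get?_empty]⟩

theorem tab_right (b : List (List Char)) (row col : Int)
    (hblen : (b.length : Int) = row) (hbrect : ∀ r ∈ b, (r.length : Int) = col) :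
    ∀ x y : Int, InR row col (x, y) →
    slideA b row col 0 1 x y ((row + col).toNat + 1) = (x, visGet (b.map destsFwd) x y) := by
  intro x y hin
  obtain ⟨hx0, hx1, hy0, hy1⟩ := hin
  simp only at hx0 hx1 hy0 hy1
  have hxl : x.toNat < b.length := by omega
  have hclen : ((b[x.toNat]).length : Int) = col := hbrect _ (List.getElem_mem hxl)
  have hcell : ∀ (k : Nat) (h : k < (b[x.toNat]).length), cellD b x (k : Int) = (b[x.toNat])[k] := by
    intro k hk
    unfold cellD
    rw [PySem.List.pyGetD_eq_getElem _ _ hx0 (by omega), PySem.List.pyGetD_natCast]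
    exact List.getD_eq_getElem _ _ hk
  have hs := slide_fwd_h b row col x (b[x.toNat]) hx0 hx1 hclen hcell
    ((row + col).toNat + 1) y.toNat (by omega) (by omega)
  rw [Int.toNat_of_nonneg hy0] at hs
  rw [hs]
  have ht : visGet (b.map destsFwd) x y = ((fwdDest (b[x.toNat]) y.toNat : Nat) : Int) := by
    unfold visGet
    rw [PySem.List.pyGetD_eq_getElem _ _ hx0 (by rw [List.length_map]; omega)]
    rw [List.getElem_map, destsFwd_eq]
    rw [PySem.List.pyGetD_eq_getElem _ _ hy0
        (by rw [List.length_map, List.length_range]; omega)]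
    rw [List.getElem_map, List.getElem_range]
  rw [ht]

theorem tab_left (b : List (List Char)) (row col : Int)
    (hblen : (b.length : Int) = row) (hbrect : ∀ r ∈ b, (r.length : Int) = col) :
    ∀ x y : Int, InR row col (x, y) →
    slideA b row col 0 (-1) x y ((row + col).toNat + 1) = (x, visGet (b.map destsBwd) x y) := by
  intro x y hin
  obtain ⟨hx0, hx1, hy0, hy1⟩ := hin
  simp only at hx0 hx1 hy0 hy1
  have hxl : x.toNat < b.length := by omega
  have hclen : ((b[x.toNat]).length : Int) = col := hbrect _ (List.getElem_mem hxl)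
  have hcell : ∀ (k : Nat) (h : k < (b[x.toNat]).length), cellD b x (k : Int) = (b[x.toNat])[k] := by
    intro k hk
    unfold cellD
    rw [PySem.List.pyGetD_eq_getElem _ _ hx0 (by omega), PySem.List.pyGetD_natCast]
    exact List.getD_eq_getElem _ _ hk
  have hs := slide_bwd_h b row col x (b[x.toNat]) hx0 hx1 hclen hcell
    ((row + col).toNat + 1) y.toNat (by omega) (by omega)
  rw [Int.toNat_of_nonneg hy0] at hs
  rw [hs]
  have ht : visGet (b.map destsBwd) x y = ((bwdDest (b[x.toNat]) y.toNat : Nat) : Int) := by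
    unfold visGet
    rw [PySem.List.pyGetD_eq_getElem _ _ hx0 (by rw [List.length_map]; omega)]
    rw [List.getElem_map, destsBwd_eq]
    rw [PySem.List.pyGetD_eq_getElem _ _ hy0
        (by rw [List.length_map, List.length_range]; omega)]
    rw [List.getElem_map, List.getElem_range]
  rw [ht]

theorem tab_down (b : List (List Char)) (row col : Int) (hrow0 : 0 ≤ row) (hcol0 : 0 ≤ col) :
    ∀ x y : Int, InR row col (x, y) →
    slideA b row col 1 0 x y ((row + col).toNat + 1)
      = (visGet (((PySem.List.pyRange 0 col 1).map
          (fun j => (PySem.List.pyRange 0 row 1).map (fun i => cellD b i j))).map destsFwd) y x, y) := by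
  intro x y hin
  obtain ⟨hx0, hx1, hy0, hy1⟩ := hin
  simp only at hx0 hx1 hy0 hy1
  have hclen : (((PySem.List.pyRange 0 row 1).map (fun i => cellD b i y)).length : Int) = row := by
    rw [List.length_map, PySem.List.length_pyRange_one]; omega
  have hcell : ∀ (k : Nat) (h : k < ((PySem.List.pyRange 0 row 1).map (fun i => cellD b i y)).length),
      cellD b (k : Int) y = ((PySem.List.pyRange 0 row 1).map (fun i => cellD b i y))[k] := by
    intro k hk
    rw [List.getElem_map, PySem.List.getElem_pyRange_one, zero_add]
  have hs := slide_fwd_v b row col y ((PySem.List.pyRange 0 row 1).map (fun i => cellD b i y))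
    hy0 hy1 hclen hcell ((row + col).toNat + 1) x.toNat (by omega) (by omega)
  rw [Int.toNat_of_nonneg hx0] at hs
  rw [hs]
  have ht : visGet (((PySem.List.pyRange 0 col 1).map
        (fun j => (PySem.List.pyRange 0 row 1).map (fun i => cellD b i j))).map destsFwd) y x
      = ((fwdDest ((PySem.List.pyRange 0 row 1).map (fun i => cellD b i y)) x.toNat : Nat) : Int) := by
    unfold visGet
    rw [PySem.List.pyGetD_eq_getElem _ _ hy0
        (by rw [List.length_map, List.length_map, PySem.List.length_pyRange_one]; omega)]
    rw [List.getElem_map, List.getElem_map, PySem.List.getElem_pyRange_one, zero_add,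
        Int.toNat_of_nonneg hy0]
    rw [destsFwd_eq]
    rw [PySem.List.pyGetD_eq_getElem _ _ hx0
        (by rw [List.length_map, List.length_range, List.length_map, PySem.List.length_pyRange_one]; omega)]
    rw [List.getElem_map, List.getElem_range]
  rw [ht]

theorem tab_up (b : List (List Char)) (row col : Int) (hrow0 : 0 ≤ row) (hcol0 : 0 ≤ col) :
    ∀ x y : Int, InR row col (x, y) →
    slideA b row col (-1) 0 x y ((row + col).toNat + 1)
      = (visGet (((PySem.List.pyRange 0 col 1).map
          (fun j => (PySem.List.pyRange 0 row 1).map (fun i => cellD b i j))).map destsBwd) y x, y) := by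
  intro x y hin
  obtain ⟨hx0, hx1, hy0, hy1⟩ := hin
  simp only at hx0 hx1 hy0 hy1
  have hclen : (((PySem.List.pyRange 0 row 1).map (fun i => cellD b i y)).length : Int) = row := by
    rw [List.length_map, PySem.List.length_pyRange_one]; omega
  have hcell : ∀ (k : Nat) (h : k < ((PySem.List.pyRange 0 row 1).map (fun i => cellD b i y)).length),
      cellD b (k : Int) y = ((PySem.List.pyRange 0 row 1).map (fun i => cellD b i y))[k] := by
    intro k hk
    rw [List.getElem_map, PySem.List.getElem_pyRange_one, zero_add]
  have hs := slide_bwd_v b row col y ((PySem.List.pyRange 0 row 1).map (fun i => cellD b i y))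
    hy0 hy1 hclen hcell ((row + col).toNat + 1) x.toNat (by omega) (by omega)
  rw [Int.toNat_of_nonneg hx0] at hs
  rw [hs]
  have ht : visGet (((PySem.List.pyRange 0 col 1).map
        (fun j => (PySem.List.pyRange 0 row 1).map (fun i => cellD b i j))).map destsBwd) y x
      = ((bwdDest ((PySem.List.pyRange 0 row 1).map (fun i => cellD b i y)) x.toNat : Nat) : Int) := by
    unfold visGet
    rw [PySem.List.pyGetD_eq_getElem _ _ hy0
        (by rw [List.length_map, List.length_map, PySem.List.length_pyRange_one]; omega)]
    rw [List.getElem_map, List.getElem_map, PySem.List.getElem_pyRange_one, zero_add,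
        Int.toNat_of_nonneg hy0]
    rw [destsBwd_eq]
    rw [PySem.List.pyGetD_eq_getElem _ _ hx0
        (by rw [List.length_map, List.length_range, List.length_map, PySem.List.length_pyRange_one]; omega)]
    rw [List.getElem_map, List.getElem_range]
  rw [ht]

theorem scanA_nostart (b : List (List Char)) (start : String) (is : List Int)
    (h : ∀ i ∈ is, ∀ j ∈ PySem.List.pyRange 0 (PySem.List.len (PySem.List.pyGetD b i [])) 1,
      isCell b i j start = false) (st : List (Int × Int) × List (List Int)) :
    is.foldl (scanA b start) st = st := by
  rw [PySem.List.foldl_congr_mem is (scanA b start) (fun acc _ => acc) st ?hc]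
  · exact PySem.List.foldl_ignore is st
  case hc =>
    intro acc i hi
    unfold scanA
    rw [PySem.List.foldl_congr_mem _ (scanRowA b start i) (fun acc _ => acc) acc ?hc2]
    · exact PySem.List.foldl_ignore _ acc
    case hc2 =>
      intro acc2 j hj
      unfold scanRowA
      rw [if_neg (by rw [h i hi j hj]; simp)]

theorem startsOf_nil (b : List (List Char)) (start : String) (row : Int)
    (h : ∀ i ∈ PySem.List.pyRange 0 row 1,
      ∀ j ∈ PySem.List.pyRange 0 (PySem.List.len (PySem.List.pyGetD b i [])) 1,
      isCell b i j start = false) :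
    startsOf b start row = [] := by
  unfold startsOf
  refine List.flatMap_eq_nil_iff.mpr ?_
  intro i hi
  refine List.filterMap_eq_nil_iff.mpr ?_
  intro j hj
  rw [h i hi j hj]
  simp

theorem bfs_main : ∀ (board : List String) (start : String) (end_ : String),
    Pre_bfs board start end_ → bfs board start end_ = bfs_alt board start end_ := by
  intro board start end_ hpre
  obtain ⟨hne, hcase⟩ := hpre
  match board, hne with
  | r0 :: rest, _ =>
  unfold bfs bfs_alt
  dsimp only []
  set b := (r0 :: rest).map String.toList with hb
  set row := PySem.List.len (r0 :: rest) with hrow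
  set col := PySem.Str.len (PySem.List.pyGetD (r0 :: rest) 0 "") with hcol
  have hrowlen : (b.length : Int) = row := by
    rw [hrow, PySem.List.len_eq, hb, List.length_map]
  have hrow0 : 0 ≤ row := by rw [hrow, PySem.List.len_eq]; omega
  have hcol' : col = (r0.toList.length : Int) := by
    rw [hcol, PySem.List.pyGetD_zero_cons, PySem.Str.len_eq]
  have hcol0 : 0 ≤ col := by rw [hcol']; omega
  have hisr : ∀ i ∈ PySem.List.pyRange 0 row 1, 0 ≤ i ∧ i < row := by
    intro i hi; exact PySem.List.mem_pyRange_one.mp hi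
  rcases hcase with hrect | hnostart
  · -- rectangular board: full lock-step simulation
    have hbrect : ∀ r ∈ b, (r.length : Int) = col := by
      intro r hr
      rw [hb] at hr
      obtain ⟨s, hs, rfl⟩ := List.mem_map.mp hr
      rw [hcol']
      have := hrect s hs
      simp only [List.headD_cons] at this
      omega
    have hrectlen : ∀ i : Int, 0 ≤ i → i < row →
        PySem.List.len (PySem.List.pyGetD b i []) = col := by
      intro i h0 h1
      rw [PySem.List.pyGetD_eq_getElem _ _ h0 (by omega), PySem.List.len_eq]
      exact hbrect _ (List.getElem_mem (by omega))
    obtain ⟨E, S, D, M, P⟩ := scan_sim b start row col hrectlen (PySem.List.pyRange 0 row 1) hisr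
      [] (List.replicate row.toNat (List.replicate col.toNat 0)) PySem.Dict.empty
      (vis0_shape row col) (vd0 row col) (by intro p hp; cases hp) (by intro p hp; cases hp)
    rw [List.nil_append] at E
    by_cases hq0 : startsOf b start row = []
    · have hq0' : ((PySem.List.pyRange 0 row 1).foldl (scanA b start)
          ([], List.replicate row.toNat (List.replicate col.toNat 0))).1 = [] := by
        rw [E]; exact hq0
      rw [if_pos hq0, hq0']
      rfl
    · rw [if_neg hq0]
      rw [E] at M P
      rw [E]
      unfold startsOf
      exact loop_sim b end_ row col _ _ _ _
        (tab_down b row col hrow0 hcol0) (tab_up b row col hrow0 hcol0)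
        (tab_right b row col hrowlen hbrect) (tab_left b row col hrowlen hbrect)
        _ _ _ _ S D M P
  · -- no start cell anywhere: both scans find nothing, both return -1
    have hfalse : ∀ i ∈ PySem.List.pyRange 0 row 1,
        ∀ j ∈ PySem.List.pyRange 0 (PySem.List.len (PySem.List.pyGetD b i [])) 1,
        isCell b i j start = false := by
      intro i hi j hj
      obtain ⟨hi0, hi1⟩ := PySem.List.mem_pyRange_one.mp hi
      obtain ⟨hj0, hj1⟩ := PySem.List.mem_pyRange_one.mp hj
      rw [PySem.List.pyGetD_eq_getElem _ _ hi0 (by omega), PySem.List.len_eq] at hj1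
      have hlt : i.toNat < b.length := by omega
      have hrowmem : b[i.toNat]'hlt ∈ b := List.getElem_mem hlt
      have hcmem : cellD b i j ∈ b[i.toNat]'hlt := by
        unfold cellD
        rw [PySem.List.pyGetD_eq_getElem _ _ hi0 (by omega),
            PySem.List.pyGetD_eq_getElem _ _ hj0 (by omega)]
        exact List.getElem_mem (by omega)
      have hrowmem2 : b[i.toNat]'hlt ∈ (r0 :: rest).map String.toList := hrowmem
      obtain ⟨s, hs, hseq⟩ := List.mem_map.mp hrowmem2
      rw [← hseq] at hcmem
      have hne' := hnostart s hs _ hcmem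
      unfold isCell
      exact beq_eq_false_iff_ne.mpr hne'
    rw [scanA_nostart b start _ hfalse, if_pos (startsOf_nil b start row hfalse)]
    rfl

-- ===== VERDICT (by name: the statement is the Claim_ definition above) =====
theorem bfs_spec : Claim_equal_bfs := by
  intro board start end_ _hdom hpre
  unfold Spec_bfs
  exact bfs_main board start end_ hpre
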